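-- pv_equiv track=rewrite | github.com/boin/CosyVoice | tools/vad.py | findNearestKW
-- ===== SOURCE A (Python) =====
-- def findNearestKW(target: str, strings: list[str]) -> str:
--     """
--         首先计算每个字符串与目标字符串的交集大小，然后筛选出交集大小相同的字符串，最后计算这些字符串的顺序匹配分数，返回分数最高的字符串。
--     Args:
--         target (str): 待匹配的keyword
--         strings (list[str]): 匹配数组
--     """
--
--     def char_intersection_count(s1, s2):
--         return len(set(s2) & set(s1.split("_")[1]))  # biz_logic
--
--     def order_match_score(s1, s2):
--         s1 = s1.split("_")[1]  # biz_logic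
--         score = 0
--         index = 0
--         for char in s1:
--             if char in s2[index:]:
--                 score += 1
--                 index = s2.index(char, index) + 1  # Move index to next position
--         return score
--
--     # Step 1: Calculate intersection counts
--     intersection_counts = {s: char_intersection_count(s, target) for s in strings}
--
--     # Step 2: Find max intersection count
--     max_count = max(intersection_counts.values())
--     candidates = [s for s, count in intersection_counts.items() if count == max_count]
--
--     # Step 3: Find the best match based on order match score
--     best_match = None
--     best_score = -1
--
--     for candidate in candidates:
--         score = order_match_score(candidate, target)
--         if score > best_score:
--             best_score = score
--             best_match = candidate
--
--     return best_match
-- ===== SOURCE B (Python) =====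
-- def findNearestKW(target: str, strings: list[str]) -> str:
--     def key(s):
--         suf = s.split("_")[1]  # biz_logic
--         inter = sum(1 for c in set(suf) if c in target)
--         score = 0
--         i = 0
--         for ch in suf:
--             j = target.find(ch, i)
--             if j >= 0:
--                 score += 1
--                 i = j + 1
--         return (inter, score)
--
--     # Single keyed pass with an explicit best/best-key accumulator; the tuple
--     # key (distinct suffix chars present in target, greedy order score) and the
--     # strict '>' comparison reproduce A's two-level first-wins selection.
--     best = strings[0]
--     bk = key(best)
--     for s in strings[1:]:
--         k = key(s)
--         if k > bk:
--             best, bk = s, k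
--     return best
-- ===== Notes on version B (the rewrite author's own statement) =====
-- stated objective: simpler
-- what changed: Replaces A's three-stage pipeline (dict of intersection counts, max over its values, candidate filter, rescan for best order score) with one pass keeping a best/best-key accumulator under the composite key (count of distinct suffix chars present in target, greedy find-based order score); the dict, the filter pass and the rescan disappear, and both helper scores are computed by direct counting/str.find instead of set intersection and slice membership.
import Mathlib
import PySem

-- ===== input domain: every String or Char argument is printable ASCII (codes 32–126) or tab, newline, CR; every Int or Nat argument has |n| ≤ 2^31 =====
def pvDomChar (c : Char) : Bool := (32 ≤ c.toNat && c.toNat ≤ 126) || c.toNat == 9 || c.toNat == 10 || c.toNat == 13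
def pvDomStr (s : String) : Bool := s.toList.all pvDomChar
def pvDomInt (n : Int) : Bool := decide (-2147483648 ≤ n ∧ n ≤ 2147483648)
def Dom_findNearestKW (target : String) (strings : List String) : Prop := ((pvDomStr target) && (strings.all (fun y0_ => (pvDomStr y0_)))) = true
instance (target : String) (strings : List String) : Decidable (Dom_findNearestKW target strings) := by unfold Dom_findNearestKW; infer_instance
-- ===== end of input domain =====

-- B replaces A's dict/max/filter/rescan pipeline with one pass keeping a best/best-key accumulator
-- under a composite (intersection-count, order-score) key (simpler, same cost).


-- ===== PORT A =====
-- s.split("_")[1]; the IndexError when '_' is absent is excluded by Pre_ (pyGet? = none there).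
def kwSuffix (s : String) : List Char :=
  (PySem.List.pyGet? (PySem.Chars.splitOn s.toList ['_']) 1).getD []

-- len(set(target) & set(s.split("_")[1]))
def charInterCount (s : String) (target : String) : Int :=
  PySem.Set.len (PySem.Set.inter (PySem.Set.ofList target.toList) (PySem.Set.ofList (kwSuffix s)))

-- order_match_score(s, target): score/index loop; s2.index(char, index) is findFrom (guarded by the membership test)
def orderMatchScore (s : String) (target : String) : Int :=
  ((kwSuffix s).foldl (fun st c =>
      if PySem.Chars.isIn [c] (PySem.List.slice target.toList (some st.2) none) then
        (st.1 + 1, PySem.Chars.findFrom target.toList [c] st.2 none + 1)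
      else st) ((0 : Int), (0 : Int))).1

def findNearestKW (target : String) (strings : List String) : String :=
  -- Step 1: dict comprehension of intersection counts
  let intersectionCounts : PySem.Dict String Int :=
    strings.foldl (fun d s => d.insert s (charInterCount s target)) PySem.Dict.empty
  -- Step 2: max over the values (ValueError on empty strings → Pre_) and candidate filter
  let maxCount : Int := (PySem.List.max? intersectionCounts.values (fun v => v)).getD 0
  let candidates : List String :=
    intersectionCounts.items.foldl (fun acc p => if p.2 == maxCount then acc ++ [p.1] else acc) []
  -- Step 3: best_match/best_score loop (best_match = None only when strings = [], excluded by Pre_)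
  ((candidates.foldl (fun st c =>
      let score := orderMatchScore c target
      if st.2 < score then (some c, score) else st)
      ((none : Option String), (-1 : Int))).1).getD ""

-- ===== PORT B =====
-- suf = s.split("_")[1] (the same line as in A; the shared helper kwSuffix is its port)
-- sum(1 for c in set(suf) if c in target)
def altInter (target : String) (suf : List Char) : Int :=
  (PySem.Set.ofList suf).foldl
    (fun acc c => if PySem.Chars.isIn [c] target.toList then acc + 1 else acc) 0

-- the score/i loop of key(s), as structural recursion on the suffix: j = target.find(ch, i)
def altScore (target : String) : List Char → Int → Int
  | [], _ => 0
  | c :: cs, i =>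
    let j := PySem.Chars.findFrom target.toList [c] i none
    if 0 ≤ j then 1 + altScore target cs (j + 1) else altScore target cs i

-- key(s) = (inter, score)
def altKey (target : String) (s : String) : Int × Int :=
  (altInter target (kwSuffix s), altScore target (kwSuffix s) 0)

-- the for-loop over strings[1:]: best/bk accumulator, Python tuple '>' comparison
def altPick (target : String) (best : String) (bk : Int × Int) : List String → String
  | [] => best
  | s :: rest =>
    let k := altKey target s
    if bk.1 < k.1 ∨ (bk.1 = k.1 ∧ bk.2 < k.2) then altPick target s k rest
    else altPick target best bk rest

def findNearestKW_alt (target : String) (strings : List String) : String :=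
  match strings with
  | [] => ""   -- strings[0] raises IndexError; excluded by Pre_
  | s0 :: rest => altPick target s0 (altKey target s0) rest

-- ===== PRECONDITION & SPEC =====
-- Pre_ excludes exactly the inputs where the Python A raises: the empty list (ValueError from max)
-- and any string without '_' (IndexError from s.split("_")[1]); B raises on the same inputs.
def Pre_findNearestKW (target : String) (strings : List String) : Prop :=
  strings ≠ [] ∧ ∀ s ∈ strings, '_' ∈ s.toList
instance (target : String) (strings : List String) : Decidable (Pre_findNearestKW target strings) := by
  unfold Pre_findNearestKW; infer_instance

def pvWitness_findNearestKW : String × List String := ("abc", ["kw_ab", "kw_cc", "kw_ab"])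

def Spec_findNearestKW (target : String) (strings : List String) (out : String) : Prop := out = findNearestKW_alt target strings
instance (target : String) (strings : List String) (out : String) : Decidable (Spec_findNearestKW target strings out) := by unfold Spec_findNearestKW; infer_instance

-- ===== CLAIM (what is proved, stated in full; the proofs are below) =====
def Claim_equal_findNearestKW : Prop := ∀ (target : String) (strings : List String), Dom_findNearestKW target strings → Pre_findNearestKW target strings → Spec_findNearestKW target strings (findNearestKW target strings)

-- ===== LEMMAS AND PROOFS =====

def pvAmax {α κ : Type} [LinearOrder κ] (K : α → κ) (x : α) (t : List α) : α :=
  t.foldl (fun b s => if K b < K s then s else b) x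
def pvIsFirstMax {α κ : Type} [LinearOrder κ] (K : α → κ) (l : List α) (y : α) : Prop :=
  ∃ pre suf, l = pre ++ y :: suf ∧ (∀ z ∈ pre, K z < K y) ∧ (∀ z ∈ suf, K z ≤ K y)

theorem pvAmax_cons {α κ : Type} [LinearOrder κ] (K : α → κ) (x c : α) (cs : List α) :
    pvAmax K x (c :: cs) = pvAmax K (if K x < K c then c else x) cs := rfl

theorem pvAmax_isFirstMax {α κ : Type} [LinearOrder κ] (K : α → κ) :
    ∀ (t : List α) (x : α), pvIsFirstMax K (x :: t) (pvAmax K x t) := by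
  intro t
  induction t with
  | nil => intro x; exact ⟨[], [], rfl, by simp, by simp⟩
  | cons a t ih =>
    intro x
    rw [pvAmax_cons]
    by_cases h : K x < K a
    · simp only [if_pos h]
      obtain ⟨pre, suf, hdec, hpre, hsuf⟩ := ih a
      cases pre with
      | nil =>
        simp only [List.nil_append] at hdec
        injection hdec with h1 h2
        subst h2
        refine ⟨[x], t, by rw [← h1]; rfl, ?_, hsuf⟩
        intro z hz; simp at hz; subst hz; rw [← h1]; exact h
      | cons p ps =>
        generalize hY : pvAmax K a t = Y at hdec hpre hsuf ⊢
        injection hdec with h1 h2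
        have hp : K a < K Y := by
          have := hpre p (by simp); rwa [← h1] at this
        refine ⟨x :: a :: ps, suf, by rw [h2]; simp, ?_, hsuf⟩
        intro z hz
        rcases List.mem_cons.mp hz with rfl | hz'
        · exact lt_trans h hp
        · rcases List.mem_cons.mp hz' with rfl | hz''
          · exact hp
          · exact hpre z (by simp [hz''])
    · simp only [if_neg h]
      obtain ⟨pre, suf, hdec, hpre, hsuf⟩ := ih x
      cases pre with
      | nil =>
        simp only [List.nil_append] at hdec
        injection hdec with h1 h2
        subst h2
        refine ⟨[], a :: t, by rw [← h1]; rfl, by simp, ?_⟩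
        intro z hz
        rcases List.mem_cons.mp hz with rfl | hz'
        · rw [← h1]; exact le_of_not_gt h
        · exact hsuf z hz'
      | cons p ps =>
        generalize hY : pvAmax K x t = Y at hdec hpre hsuf ⊢
        injection hdec with h1 h2
        refine ⟨x :: a :: ps, suf, by rw [h2]; simp, ?_, hsuf⟩
        intro z hz
        have hx : K x < K Y := by
          have := hpre p (by simp); rwa [← h1] at this
        rcases List.mem_cons.mp hz with rfl | hz'
        · exact hx
        · rcases List.mem_cons.mp hz' with rfl | hz''
          · exact lt_of_le_of_lt (le_of_not_gt h) hx
          · exact hpre z (by simp [hz''])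

theorem pvIsFirstMax_mem {α κ : Type} [LinearOrder κ] (K : α → κ) {l : List α} {y : α}
    (h : pvIsFirstMax K l y) : y ∈ l := by
  obtain ⟨pre, suf, rfl, -, -⟩ := h; simp

theorem pvIsFirstMax_le {α κ : Type} [LinearOrder κ] (K : α → κ) {l : List α} {y : α}
    (h : pvIsFirstMax K l y) : ∀ z ∈ l, K z ≤ K y := by
  obtain ⟨pre, suf, rfl, hpre, hsuf⟩ := h
  intro z hz
  rcases List.mem_append.mp hz with hz' | hz'
  · exact le_of_lt (hpre z hz')
  · rcases List.mem_cons.mp hz' with rfl | hz''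
    · exact le_refl _
    · exact hsuf z hz''

theorem pvIsFirstMax_unique {α κ : Type} [LinearOrder κ] (K : α → κ) {l : List α} {y y' : α}
    (h1 : pvIsFirstMax K l y) (h2 : pvIsFirstMax K l y') : y = y' := by
  obtain ⟨pre, suf, rfl, hpre, hsuf⟩ := h1
  obtain ⟨pre', suf', hdec, hpre', hsuf'⟩ := h2
  rcases List.append_eq_append_iff.mp hdec with ⟨mid, h1, h2⟩ | ⟨mid, h1, h2⟩
  · cases mid with
    | nil => simp at h2; exact h2.1
    | cons u us =>
      injection h2 with hu hrest
      subst hu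
      have hy : K y < K y' := hpre' y (by rw [h1]; simp)
      have hy' : K y' ≤ K y := hsuf y' (by rw [hrest]; simp)
      exact absurd hy (not_lt.mpr hy')
  · cases mid with
    | nil => simp at h2; exact h2.1.symm
    | cons u us =>
      injection h2 with hu hrest
      subst hu
      have hy : K y' < K y := hpre y' (by rw [h1]; simp)
      have hy' : K y ≤ K y' := hsuf' y (by rw [hrest]; simp)
      exact absurd hy (not_lt.mpr hy')

theorem pvIsFirstMax_snoc {α κ : Type} [LinearOrder κ] (K : α → κ) (m : List α) (b y : α) :
    pvIsFirstMax K (m ++ [b]) y ↔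
      (pvIsFirstMax K m y ∧ K b ≤ K y) ∨ (y = b ∧ ∀ z ∈ m, K z < K b) := by
  constructor
  · rintro ⟨pre, suf, hdec, hpre, hsuf⟩
    rcases List.eq_nil_or_concat' suf with rfl | ⟨s', b', rfl⟩
    · have h := List.append_singleton_inj.mp hdec.symm
      exact Or.inr ⟨h.2, fun z hz => h.2 ▸ hpre z (h.1 ▸ hz)⟩
    · rw [show pre ++ y :: (s' ++ [b']) = (pre ++ y :: s') ++ [b'] by simp] at hdec
      have h := List.append_singleton_inj.mp hdec.symm
      refine Or.inl ⟨⟨pre, s', h.1.symm, hpre, fun z hz => hsuf z (by simp [hz])⟩, ?_⟩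
      have hb := hsuf b' (by simp)
      rwa [h.2] at hb
  · rintro (⟨⟨pre, suf, rfl, hpre, hsuf⟩, hb⟩ | ⟨rfl, hall⟩)
    · refine ⟨pre, suf ++ [b], by simp, hpre, ?_⟩
      intro z hz
      rcases List.mem_append.mp hz with hz' | hz'
      · exact hsuf z hz'
      · simp at hz'; subst hz'; exact hb
    · exact ⟨m, [], rfl, hall, by simp⟩

theorem pvOfList_snoc {α : Type} [BEq α] [LawfulBEq α] (l : List α) (b : α) :
    PySem.Set.ofList (l ++ [b]) =
      if b ∈ l then PySem.Set.ofList l else PySem.Set.ofList l ++ [b] := by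
  rw [PySem.Set.ofList_eq_foldl, List.foldl_append]
  rw [← PySem.Set.ofList_eq_foldl]
  show PySem.Set.add (PySem.Set.ofList l) b = _
  rw [PySem.Set.add_eq_ite]
  simp [PySem.Set.mem_ofList]

theorem pvIsFirstMax_dedup {α κ : Type} [BEq α] [LawfulBEq α] [LinearOrder κ] (K : α → κ) :
    ∀ (l : List α) (y : α), pvIsFirstMax K (PySem.Set.ofList l) y ↔ pvIsFirstMax K l y := by
  intro l
  induction l using List.reverseRecOn with
  | nil => intro y; rfl
  | append_singleton l b ih =>
    intro y
    rw [pvOfList_snoc]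
    by_cases hb : b ∈ l
    · rw [if_pos hb, ih]
      constructor
      · intro h
        rw [pvIsFirstMax_snoc]
        exact Or.inl ⟨h, pvIsFirstMax_le K h b hb⟩
      · intro h
        rcases (pvIsFirstMax_snoc K l b y).mp h with ⟨h1, -⟩ | ⟨rfl, hall⟩
        · exact h1
        · exact absurd (hall y hb) (lt_irrefl _)
    · rw [if_neg hb, pvIsFirstMax_snoc, pvIsFirstMax_snoc, ih]
      constructor
      · rintro (⟨h1, h2⟩ | ⟨rfl, hall⟩)
        · exact Or.inl ⟨h1, h2⟩
        · exact Or.inr ⟨rfl, fun z hz => hall z ((PySem.Set.mem_ofList l z).mpr hz)⟩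
      · rintro (⟨h1, h2⟩ | ⟨rfl, hall⟩)
        · exact Or.inl ⟨h1, h2⟩
        · exact Or.inr ⟨rfl, fun z hz => hall z ((PySem.Set.mem_ofList l z).mp hz)⟩

theorem pvBridge_filter {α : Type} (f g : α → Int) (M : Int) :
    ∀ (l : List α) (y : α), (∀ z ∈ l, f z ≤ M) →
      pvIsFirstMax g (l.filter (fun s => f s == M)) y →
      pvIsFirstMax (fun s => toLex (f s, g s) : α → Int ×ₗ Int) l y := by
  intro l
  induction l with
  | nil => intro y _ h; obtain ⟨pre, suf, hdec, -, -⟩ := h; simp at hdec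
  | cons a l ih =>
    intro y hub h
    have hlt : ∀ (u v : α), f u < f v ∨ (f u = f v ∧ g u < g v) →
        (fun s => toLex (f s, g s) : α → Int ×ₗ Int) u < (fun s => toLex (f s, g s)) v := by
      intro u v hc
      rcases hc with h1 | ⟨h1, h2⟩
      · exact Prod.Lex.toLex_lt_toLex.mpr (Or.inl h1)
      · exact Prod.Lex.toLex_lt_toLex.mpr (Or.inr ⟨h1, h2⟩)
    by_cases ha : f a == M
    · rw [show List.filter (fun s => f s == M) (a :: l) = a :: List.filter (fun s => f s == M) l from List.filter_cons_of_pos ha] at h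
      have haM : f a = M := by exact_mod_cast (beq_iff_eq ..).mp ha
      obtain ⟨pre, suf, hdec, hpre, hsuf⟩ := h
      cases pre with
      | nil =>
        simp only [List.nil_append] at hdec
        injection hdec with h1 h2
        subst h1
        refine ⟨[], l, rfl, by simp, ?_⟩
        intro z hz
        by_cases hzM : f z = M
        · have hzf : z ∈ List.filter (fun s => f s == M) l := by
            rw [List.mem_filter]; exact ⟨hz, by simp [hzM]⟩
          rw [h2] at hzf
          rcases eq_or_lt_of_le (hsuf z hzf) with he | hl
          · exact le_of_eq (by
              show toLex (f z, g z) = toLex (f a, g a)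
              rw [hzM, haM, he])
          · exact le_of_lt (hlt z a (Or.inr ⟨by rw [hzM, haM], hl⟩))
        · have : f z < M := lt_of_le_of_ne (hub z (by simp [hz])) hzM
          exact le_of_lt (hlt z a (Or.inl (by rw [haM]; exact this)))
      | cons p ps =>
        injection hdec with h1 h2
        have hy : pvIsFirstMax g (List.filter (fun s => f s == M) l) y :=
          ⟨ps, suf, h2, fun z hz => hpre z (by simp [hz]), hsuf⟩
        have hyM : f y = M := by
          have := pvIsFirstMax_mem g hy
          rw [List.mem_filter] at this
          exact_mod_cast (beq_iff_eq ..).mp this.2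
        obtain ⟨P, S, hdec', hP, hS⟩ := ih y (fun z hz => hub z (by simp [hz])) hy
        refine ⟨a :: P, S, by rw [hdec']; rfl, ?_, hS⟩
        intro z hz
        rcases List.mem_cons.mp hz with rfl | hz'
        · have hga : g z < g y := by
            have := hpre p (by simp); rwa [← h1] at this
          exact hlt z y (Or.inr ⟨by rw [haM, hyM], hga⟩)
        · exact hP z hz'
    · rw [List.filter_cons_of_neg (by simpa using ha)] at h
      have hyM : f y = M := by
        have := pvIsFirstMax_mem g h
        rw [List.mem_filter] at this
        exact_mod_cast (beq_iff_eq ..).mp this.2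
      obtain ⟨P, S, hdec', hP, hS⟩ := ih y (fun z hz => hub z (by simp [hz])) h
      refine ⟨a :: P, S, by rw [hdec']; rfl, ?_, hS⟩
      intro z hz
      rcases List.mem_cons.mp hz with rfl | hz'
      · have : f z < M := lt_of_le_of_ne (hub z (by simp)) (by simpa using ha)
        exact Prod.Lex.toLex_lt_toLex.mpr (Or.inl (by rw [hyM]; exact this))
      · exact hP z hz'

theorem pvOrderScore_nonneg (s target : String) : 0 ≤ orderMatchScore s target := by
  unfold orderMatchScore
  suffices h : ∀ (cs : List Char) (st : Int × Int), 0 ≤ st.1 →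
      0 ≤ (cs.foldl (fun st c =>
        if PySem.Chars.isIn [c] (PySem.List.slice target.toList (some st.2) none) then
          (st.1 + 1, PySem.Chars.findFrom target.toList [c] st.2 none + 1)
        else st) st).1 by
    exact h (kwSuffix s) (0, 0) le_rfl
  intro cs
  induction cs with
  | nil => intro st h; exact h
  | cons c cs ih =>
    intro st h
    simp only [List.foldl_cons]
    split_ifs with hc
    · exact ih _ (by simp; omega)
    · exact ih _ h

theorem pvGetD_foldl_insert_key (f : String → Int) :
    ∀ (l : List String) (d : PySem.Dict String Int) (k : String),
      (l.foldl (fun d s => d.insert s (f s)) d).getD k 0 =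
        if k ∈ l then f k else d.getD k 0 := by
  intro l
  induction l with
  | nil => intro d k; simp
  | cons a l ih =>
    intro d k
    simp only [List.foldl_cons]
    rw [ih]
    rw [PySem.Dict.getD_insert]
    by_cases h1 : k ∈ l
    · simp [h1]
    · by_cases h2 : k = a <;> simp [h1, h2]

theorem pvItems_foldl_insert_key (f : String → Int) (l : List String) :
    (l.foldl (fun d s => d.insert s (f s)) PySem.Dict.empty).items =
      (PySem.Set.ofList l).map (fun s => (s, f s)) := by
  have hnd : (l.foldl (fun d s => d.insert s (f s)) PySem.Dict.empty).keys.Nodup :=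
    PySem.Dict.nodup_keys_foldl_insert l _ PySem.Dict.empty (by simp [PySem.Dict.keys_empty])
  have hkeys : (l.foldl (fun d s => d.insert s (f s)) PySem.Dict.empty).keys = PySem.Set.ofList l := by
    rw [PySem.Dict.keys_foldl_insert]
    simp [PySem.Dict.keys_empty, PySem.Set.update_nil_left]
  rw [PySem.Dict.items_eq_map_keys _ hnd 0, hkeys]
  apply List.map_congr_left
  intro k hk
  have hkl : k ∈ l := (PySem.Set.mem_ofList l k).mp hk
  rw [pvGetD_foldl_insert_key f l PySem.Dict.empty k]
  simp [hkl]

theorem pvLoopA (g : String → Int) :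
    ∀ (cs : List String) (b : String),
      cs.foldl (fun st c => let score := g c; if st.2 < score then (some c, score) else st)
        ((some b : Option String), g b) =
      (some (pvAmax g b cs), g (pvAmax g b cs)) := by
  intro cs
  induction cs with
  | nil => intro b; rfl
  | cons c cs ih =>
    intro b
    simp only [List.foldl_cons]
    rw [pvAmax_cons]
    by_cases h : g b < g c
    · simp only [if_pos h]; exact ih c
    · simp only [if_neg h]; exact ih b

-- [c] is an infix of s iff c is an element of s
theorem pvSingleton_infix {c : Char} {s : List Char} : [c] <:+: s ↔ c ∈ s := by
  constructor
  · intro h; exact h.sublist.subset (by simp)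
  · intro h
    obtain ⟨u, v, rfl⟩ := List.append_of_mem h
    exact ⟨u, v, by simp⟩

theorem pvIsIn_single (c : Char) (s : List Char) :
    PySem.Chars.isIn [c] s = true ↔ c ∈ s := by
  rw [PySem.Chars.isIn_iff_infix, pvSingleton_infix]

-- count-fold = filter length
theorem pvFoldl_count {α : Type} (p : α → Bool) :
    ∀ (l : List α) (a : Int),
      l.foldl (fun acc c => if p c then acc + 1 else acc) a = a + (l.filter p).length := by
  intro l
  induction l with
  | nil => intro a; simp
  | cons x l ih =>
    intro a
    simp only [List.foldl_cons]
    by_cases h : p x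
    · rw [if_pos h, ih, List.filter_cons_of_pos h]
      simp only [List.length_cons]; push_cast; ring
    · rw [if_neg h, ih, List.filter_cons_of_neg (by simpa using h)]

theorem pvAltInter_eq (target s : String) :
    altInter target (kwSuffix s) = charInterCount s target := by
  unfold altInter charInterCount
  rw [pvFoldl_count]
  simp only [zero_add]
  unfold PySem.Set.len PySem.Set.inter
  norm_cast
  apply List.Perm.length_eq
  rw [List.perm_ext_iff_of_nodup
    ((PySem.Set.nodup_ofList (kwSuffix s)).filter _)
    ((PySem.Set.nodup_ofList target.toList).filter _)]
  intro a
  simp only [List.mem_filter, PySem.Set.mem_ofList, List.contains_iff_mem,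
    pvIsIn_single, decide_eq_true_eq]
  constructor
  · rintro ⟨h1, h2⟩; exact ⟨h2, by simpa using h1⟩
  · rintro ⟨h1, h2⟩; exact ⟨by simpa using h2, h1⟩

-- B's altScore equals A's score fold (index always a Nat ≤ |target|).
theorem pvAltScore_eq (target : String) :
    ∀ (cs : List Char) (a : Int) (k : Nat), k ≤ target.toList.length →
      (cs.foldl (fun st c =>
          if PySem.Chars.isIn [c] (PySem.List.slice target.toList (some st.2) none) then
            (st.1 + 1, PySem.Chars.findFrom target.toList [c] st.2 none + 1)
          else st) (a, (k : Int))).1 = a + altScore target cs (k : Int) := by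
  intro cs
  induction cs with
  | nil => intro a k hk; simp [altScore]
  | cons c cs ih =>
    intro a k hk
    simp only [List.foldl_cons, altScore]
    have hslice : PySem.List.slice target.toList (some (k : Int)) none = target.toList.drop k :=
      PySem.List.slice_from_natCast target.toList k
    have hff := PySem.Chars.findFrom_natCast target.toList [c] k hk
    by_cases hin : c ∈ target.toList.drop k
    · have hcond : PySem.Chars.isIn [c] (PySem.List.slice target.toList (some (k : Int)) none) = true := by
        rw [hslice]; exact (pvIsIn_single c _).mpr hin
      have hfind : PySem.Chars.find (target.toList.drop k) [c] ≠ -1 := by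
        rw [PySem.Chars.find_ne_neg_one_iff, pvSingleton_infix]; exact hin
      have hfind0 : 0 ≤ PySem.Chars.find (target.toList.drop k) [c] := by
        have := PySem.Chars.neg_one_le_find (target.toList.drop k) [c]
        omega
      have hffval : PySem.Chars.findFrom target.toList [c] (k : Int) none =
          (k : Int) + PySem.Chars.find (target.toList.drop k) [c] := by
        rw [hff, if_neg hfind]
      have hj0 : 0 ≤ PySem.Chars.findFrom target.toList [c] (k : Int) none := by
        rw [hffval]; omega
      -- the found position is a strict index: find < length of the drop
      have hlt : (PySem.Chars.find (target.toList.drop k) [c]).toNat < (target.toList.drop k).length := by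
        have hspec := (PySem.Chars.find_spec hfind0).1
        by_contra hge
        push_neg at hge
        have : (target.toList.drop k).drop (PySem.Chars.find (target.toList.drop k) [c]).toNat = [] :=
          List.drop_eq_nil_of_le hge
        rw [this] at hspec
        exact absurd (List.IsPrefix.length_le hspec) (by simp)
      have hnext : PySem.Chars.findFrom target.toList [c] (k : Int) none + 1 =
          ((k + (PySem.Chars.find (target.toList.drop k) [c]).toNat + 1 : Nat) : Int) := by
        rw [hffval]; push_cast; omega
      have hnextle : k + (PySem.Chars.find (target.toList.drop k) [c]).toNat + 1 ≤ target.toList.length := by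
        have := List.length_drop (l := target.toList) (i := k)
        omega
      rw [if_pos hcond, if_pos hj0]
      rw [hnext, ih (a + 1) _ hnextle, ← hnext]
      ring
    · have hcond : ¬ PySem.Chars.isIn [c] (PySem.List.slice target.toList (some (k : Int)) none) = true := by
        rw [hslice, pvIsIn_single]; exact hin
      have hfind : PySem.Chars.find (target.toList.drop k) [c] = -1 := by
        rw [PySem.Chars.find_eq_neg_one_iff, pvSingleton_infix]; exact hin
      have hj : PySem.Chars.findFrom target.toList [c] (k : Int) none = -1 := by
        rw [hff, if_pos hfind]
      rw [if_neg hcond, if_neg (by rw [hj]; omega)]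
      exact ih a k hk

theorem pvAltKey_eq (target s : String) :
    altKey target s = (charInterCount s target, orderMatchScore s target) := by
  unfold altKey
  rw [pvAltInter_eq]
  congr 1
  unfold orderMatchScore
  have := pvAltScore_eq target (kwSuffix s) 0 0 (by omega)
  simp only [Nat.cast_zero, zero_add] at this
  exact this.symm

-- B's selection loop is pvAmax under the lexicographic key.
theorem pvAltPick_eq (target : String) :
    ∀ (rest : List String) (best : String),
      altPick target best (altKey target best) rest =
        pvAmax (fun s => toLex (altKey target s) : String → Int ×ₗ Int) best rest := by
  intro rest
  induction rest with
  | nil => intro best; rfl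
  | cons s rest ih =>
    intro best
    rw [pvAmax_cons]
    show (if (altKey target best).1 < (altKey target s).1 ∨
            ((altKey target best).1 = (altKey target s).1 ∧ (altKey target best).2 < (altKey target s).2)
          then altPick target s (altKey target s) rest
          else altPick target best (altKey target best) rest) = _
    have hcond : ((altKey target best).1 < (altKey target s).1 ∨
        ((altKey target best).1 = (altKey target s).1 ∧ (altKey target best).2 < (altKey target s).2)) ↔
        (toLex (altKey target best) : Int ×ₗ Int) < toLex (altKey target s) := by
      rw [Prod.Lex.toLex_lt_toLex]
    by_cases h : (toLex (altKey target best) : Int ×ₗ Int) < toLex (altKey target s)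
    · rw [if_pos (hcond.mpr h), if_pos h]; exact ih s
    · rw [if_neg (fun hc => h (hcond.mp hc)), if_neg h]; exact ih best

theorem pvMain : ∀ (target : String) (strings : List String), strings ≠ [] →
    findNearestKW target strings = findNearestKW_alt target strings := by
  intro target strings hne
  obtain ⟨s0, rest, rfl⟩ := List.exists_cons_of_ne_nil hne
  have hDne : PySem.Set.ofList (s0 :: rest) ≠ [] :=
    List.ne_nil_of_mem ((PySem.Set.mem_ofList _ s0).mpr (by simp))
  have hmaxne : PySem.List.max? ((PySem.Set.ofList (s0 :: rest)).map (fun s => charInterCount s target)) (fun v => v) ≠ none := by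
    rw [Ne, PySem.List.max?_eq_none_iff, List.map_eq_nil_iff]
    exact hDne
  obtain ⟨m, hm⟩ := Option.ne_none_iff_exists'.mp hmaxne
  have hub : ∀ z ∈ PySem.Set.ofList (s0 :: rest), charInterCount z target ≤ m := by
    intro z hz
    exact PySem.List.max?_isMax hm _ (List.mem_map_of_mem hz)
  obtain ⟨w, hw, hwm⟩ := List.mem_map.mp (PySem.List.max?_mem hm)
  -- A-side reduction, exactly as before
  show (let intersectionCounts : PySem.Dict String Int :=
         (s0 :: rest).foldl (fun d s => d.insert s (charInterCount s target)) PySem.Dict.empty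
        let maxCount : Int := (PySem.List.max? intersectionCounts.values (fun v => v)).getD 0
        let candidates : List String :=
          intersectionCounts.items.foldl (fun acc p => if p.2 == maxCount then acc ++ [p.1] else acc) []
        ((candidates.foldl (fun st c =>
            let score := orderMatchScore c target
            if st.2 < score then (some c, score) else st)
            ((none : Option String), (-1 : Int))).1).getD "") = _
  have hitems := pvItems_foldl_insert_key (fun s => charInterCount s target) (s0 :: rest)
  have hvalues : ((s0 :: rest).foldl (fun d s => d.insert s (charInterCount s target)) PySem.Dict.empty).values
      = (PySem.Set.ofList (s0 :: rest)).map (fun s => charInterCount s target) := by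
    show (((s0 :: rest).foldl (fun d s => d.insert s (charInterCount s target)) PySem.Dict.empty).items.map Prod.snd) = _
    rw [hitems, List.map_map]
    rfl
  simp only [hvalues, hitems, hm, Option.getD_some]
  rw [PySem.List.foldl_append_if]
  rw [List.filter_map, List.map_map]
  simp only [List.nil_append]
  have hmapid : ((PySem.Set.ofList (s0 :: rest)).filter
      ((fun p => p.2 == m) ∘ fun s => (s, charInterCount s target))).map (Prod.fst ∘ fun s => (s, charInterCount s target))
      = (PySem.Set.ofList (s0 :: rest)).filter (fun s => charInterCount s target == m) := by
    rw [show (Prod.fst ∘ fun s => (s, charInterCount s target)) = id by funext s; rfl, List.map_id]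
    rfl
  rw [hmapid]
  have hCne : (PySem.Set.ofList (s0 :: rest)).filter (fun s => charInterCount s target == m) ≠ [] := by
    apply List.ne_nil_of_mem (a := w)
    rw [List.mem_filter]
    exact ⟨hw, by simp [hwm]⟩
  obtain ⟨c, cs, hC⟩ := List.exists_cons_of_ne_nil hCne
  rw [hC]
  rw [List.foldl_cons]
  have hstep1 : (let score := orderMatchScore c target
      if (-1 : Int) < score then ((some c : Option String), score) else ((none : Option String), (-1 : Int)))
      = ((some c : Option String), orderMatchScore c target) := by
    have := pvOrderScore_nonneg c target
    simp only []
    rw [if_pos (by omega)]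
  rw [hstep1, pvLoopA (fun s => orderMatchScore s target) cs c]
  simp only [Option.getD_some]
  have hA1 : pvIsFirstMax (fun s => orderMatchScore s target) (c :: cs)
      (pvAmax (fun s => orderMatchScore s target) c cs) := pvAmax_isFirstMax _ cs c
  rw [← hC] at hA1
  have hA2 := pvBridge_filter (fun s => charInterCount s target) (fun s => orderMatchScore s target) m
      (PySem.Set.ofList (s0 :: rest)) _ hub hA1
  rw [pvIsFirstMax_dedup] at hA2
  -- B side: altPick is pvAmax under the lex key (altKey = the pair of A's two scores)
  have hB : findNearestKW_alt target (s0 :: rest)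
      = pvAmax (fun s => toLex (charInterCount s target, orderMatchScore s target) : String → Int ×ₗ Int) s0 rest := by
    show altPick target s0 (altKey target s0) rest = _
    rw [pvAltPick_eq]
    have hk : (fun s => toLex (altKey target s) : String → Int ×ₗ Int)
        = (fun s => toLex (charInterCount s target, orderMatchScore s target)) := by
      funext s; rw [pvAltKey_eq]
    rw [hk]
  rw [hB]
  have hB1 : pvIsFirstMax (fun s => toLex (charInterCount s target, orderMatchScore s target) : String → Int ×ₗ Int)
      (s0 :: rest)
      (pvAmax (fun s => toLex (charInterCount s target, orderMatchScore s target) : String → Int ×ₗ Int) s0 rest) :=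
    pvAmax_isFirstMax _ rest s0
  exact pvIsFirstMax_unique _ hA2 hB1

-- ===== VERDICT (by name: the statement is the Claim_ definition above) =====
theorem findNearestKW_spec : Claim_equal_findNearestKW := by
  intro target strings _ hpre
  show findNearestKW target strings = findNearestKW_alt target strings
  exact pvMain target strings hpre.1
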